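-- pv_equiv track=rewrite | github.com/photboll/leetcode | 3557.find-maximum-number-of-non-intersecting-substrings.py | maxSubstrings
-- ===== SOURCE A (Python) =====
-- from collections import defaultdict
--
-- def maxSubstrings(word: str) -> int:
--
--     res = 0
--     previ = defaultdict(int)
--
--
--     for i, char in enumerate(word):
--         if char not in previ:
--             previ[char] = i
--
--         #the char needs to be atleast four spaces apart
--         elif i >= previ[char] + 3:
--             #we clear the dict to avoid counting intersecting chars
--             previ.clear()
--             res += 1
--
--     return res
-- ===== SOURCE B (Python) =====
-- def maxSubstrings(word: str) -> int:
--     # Phase 1: far[j] = last occurrence of word[j] at an index <= j-3, or -1.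
--     far = []
--     last = {}
--     for j, c in enumerate(word):
--         if j >= 3:
--             last[word[j - 3]] = j - 3
--         far.append(last.get(c, -1))
--     # Phase 2: greedy over the precomputed array, no dict, no reset:
--     # a cut at j is possible iff word[j] occurred at some k with i <= k <= j-3,
--     # i.e. iff far[j] >= i (far[j] is the LAST such occurrence <= j-3).
--     res = 0
--     i = 0
--     for j, f in enumerate(far):
--         if f >= i:
--             res += 1
--             i = j + 1
--     return res
-- ===== Notes on version B (the rewrite author's own statement) =====
-- stated objective: alternative
-- what changed: A is a single stateful pass that tracks first occurrences per segment in a dict and clears it at each cut; B is two independent passes: it first precomputes, with a lag-3 last-occurrence dict, an array far[j] = last occurrence of word[j] at index <= j-3 (or -1), then runs a dict-free greedy over that array cutting whenever far[j] >= current segment start.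
import Mathlib
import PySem

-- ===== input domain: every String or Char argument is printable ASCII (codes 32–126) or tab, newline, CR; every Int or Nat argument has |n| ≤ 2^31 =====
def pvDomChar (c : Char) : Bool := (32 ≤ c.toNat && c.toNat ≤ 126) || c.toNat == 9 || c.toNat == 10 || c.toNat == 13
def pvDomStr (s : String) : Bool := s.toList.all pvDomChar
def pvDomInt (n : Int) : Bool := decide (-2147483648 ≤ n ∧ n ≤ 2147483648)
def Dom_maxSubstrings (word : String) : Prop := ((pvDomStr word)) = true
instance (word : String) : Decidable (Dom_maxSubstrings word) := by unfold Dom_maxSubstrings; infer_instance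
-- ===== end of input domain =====

-- B replaces A's single stateful pass (per-segment first-occurrence dict, cleared at each
-- cut) by two independent passes: precompute far[j] = last occurrence of word[j] at an
-- index ≤ j-3 (or -1), then a dict-free greedy over that array (objective: alternative).

-- ===== PORT A =====
-- the body of A's for-loop (branches in A's order: 'char not in previ' first, then the elif)
def pvStepA (st : Int × PySem.Dict Char Int) (p : Int × Char) : Int × PySem.Dict Char Int :=
  match st.2.get? p.2 with
  | none => (st.1, st.2.insert p.2 p.1)
  | some v => if p.1 ≥ v + 3 then (st.1 + 1, PySem.Dict.empty) else st

def maxSubstrings (word : String) : Int :=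
  ((PySem.List.enumerate word.toList 0).foldl pvStepA (0, PySem.Dict.empty)).1

-- ===== PORT B =====
-- phase 1 of Source B, loop body: if j >= 3: last[word[j-3]] = j-3; far.append(last.get(c, -1))
-- (word[j-3] is always in range here since 3 ≤ j < len(word); .getD ' ' is never taken)
def pvFarStep (w : List Char) (st : PySem.Dict Char Int × List Int) (p : Int × Char) :
    PySem.Dict Char Int × List Int :=
  let last := if p.1 ≥ 3 then st.1.insert ((PySem.List.pyGet? w (p.1 - 3)).getD ' ') (p.1 - 3) else st.1
  (last, st.2 ++ [last.getD p.2 (-1)])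

def pvFar (w : List Char) : List Int :=
  ((PySem.List.enumerate w 0).foldl (pvFarStep w) (PySem.Dict.empty, [])).2

-- phase 2 of Source B, loop body: if f >= i: res += 1; i = j + 1   (state = (res, i))
def pvCutStep (st : Int × Int) (p : Int × Int) : Int × Int :=
  if p.2 ≥ st.2 then (st.1 + 1, p.1 + 1) else st

def maxSubstrings_alt (word : String) : Int :=
  ((PySem.List.enumerate (pvFar word.toList) 0).foldl pvCutStep (0, 0)).1

-- ===== PRECONDITION & SPEC =====
def Spec_maxSubstrings (word : String) (out : Int) : Prop := out = maxSubstrings_alt word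
instance (word : String) (out : Int) : Decidable (Spec_maxSubstrings word out) := by unfold Spec_maxSubstrings; infer_instance

-- ===== CLAIM (what is proved, stated in full; the proofs are below) =====
def Claim_equal_maxSubstrings : Prop := ∀ (word : String), Dom_maxSubstrings word → Spec_maxSubstrings word (maxSubstrings word)

-- ===== LEMMAS AND PROOFS =====

-- the cut condition both programs implement: some occurrence of w[j] in [i, j-3]
def pvCondB (w : List Char) (i j : Nat) : Bool :=
  (List.range j).any (fun k => decide (i ≤ k) && decide (k + 3 ≤ j) && (w[k]? == w[j]?))

-- reference greedy: shared intermediate form of both programs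
def pvRef (w : List Char) : List Char → Nat → Nat → Int → Int
  | [], _, _, res => res
  | _ :: t, j, i, res =>
    if pvCondB w i j then pvRef w t (j+1) (j+1) (res+1) else pvRef w t (j+1) i res

theorem pvCondB_iff (w : List Char) (i j : Nat) :
    pvCondB w i j = true ↔ ∃ k, i ≤ k ∧ k + 3 ≤ j ∧ w[k]? = w[j]? := by
  unfold pvCondB
  rw [List.any_eq_true]
  constructor
  · rintro ⟨k, hk, hp⟩
    simp only [Bool.and_eq_true, decide_eq_true_eq, beq_iff_eq] at hp
    exact ⟨k, hp.1.1, hp.1.2, hp.2⟩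
  · rintro ⟨k, h1, h2, h3⟩
    exact ⟨k, List.mem_range.mpr (by omega), by simp [h1, h2, h3]⟩

-- greatest k < b with w[k] = c
def pvLastOcc (w : List Char) (b : Nat) (c : Char) : Option Nat :=
  (List.range b).reverse.find? (fun k => w[k]? == some c)

-- what far[j] is: greatest occurrence of w[j] at index ≤ j-3, or -1
def pvLo (w : List Char) (j : Nat) : Int :=
  match (List.range (j - 2)).reverse.find? (fun k => w[k]? == w[j]?) with
  | some k => (k : Int)
  | none => -1

theorem drop_cons_head {w t : List Char} {c : Char} {j : Nat} (h : w.drop j = c :: t) :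
    w[j]? = some c := by
  have h0 : (w.drop j)[0]? = w[j + 0]? := List.getElem?_drop
  rw [h] at h0; simpa using h0.symm

theorem drop_cons_tail {w t : List Char} {c : Char} {j : Nat} (h : w.drop j = c :: t) :
    w.drop (j + 1) = t := by
  have h1 : (w.drop j).drop 1 = t := by rw [h]; rfl
  rw [List.drop_drop] at h1
  simpa [Nat.add_comm] using h1

theorem drop_cons_lt {w t : List Char} {c : Char} {j : Nat} (h : w.drop j = c :: t) :
    j < w.length := by
  by_contra hj
  rw [List.drop_eq_nil_of_le (by omega)] at h; cases h

-- ---- the cut condition via pvLo: pvLo w j ≥ i ↔ pvCondB w i j ----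
theorem pvLo_ge_iff (w : List Char) (i j : Nat) :
    (pvLo w j ≥ (i : Int)) ↔ pvCondB w i j = true := by
  rw [pvCondB_iff]
  cases hf : (List.range (j - 2)).reverse.find? (fun k => w[k]? == w[j]?) with
  | none =>
    simp only [pvLo, hf, ge_iff_le]
    constructor
    · intro h; exfalso; omega
    · rintro ⟨k, hik, h3, he⟩
      have hk : k ∈ (List.range (j - 2)).reverse := by
        simp only [List.mem_reverse, List.mem_range]; omega
      have := List.find?_eq_none.mp hf k hk
      simp [he] at this
  | some k =>
    simp only [pvLo, hf, ge_iff_le]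
    constructor
    · intro h
      have hp := List.find?_some hf
      have hm := List.mem_of_find?_eq_some hf
      simp only [List.mem_reverse, List.mem_range] at hm
      simp only [beq_iff_eq] at hp
      exact ⟨k, by exact_mod_cast h, by omega, hp⟩  -- i ≤ k from ↑i ≤ ↑k
    · rintro ⟨k', hik', h3, he⟩
      -- k is the greatest match; k' is a match, so k ≥ k' ≥ i
      obtain ⟨hp, as, bs, hdec, has⟩ := List.find?_eq_some_iff_append.mp hf
      have hk' : k' ∈ (List.range (j - 2)).reverse := by
        simp only [List.mem_reverse, List.mem_range]; omega
      rw [hdec] at hk'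
      have hpw : ((as ++ k :: bs).Pairwise (· > ·)) := by
        rw [← hdec, List.pairwise_reverse]
        exact List.pairwise_lt_range
      rcases List.mem_append.mp hk' with hin | hin
      · exfalso
        have := has k' hin
        simp [he] at this
      · rcases List.mem_cons.mp hin with rfl | hin
        · exact_mod_cast hik'
        · have : k > k' :=
            List.rel_of_pairwise_cons ((List.pairwise_append.mp hpw).2.1) hin
          have : (k' : Int) ≤ (k : Int) := by exact_mod_cast Nat.le_of_lt this
          omega

-- ---- A's fold equals the reference greedy ----
-- Inv: the dict holds exactly the first occurrence in [i, j) of each char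
theorem lemA (w : List Char) : ∀ (l : List Char) (j i : Nat) (res : Int)
    (d : PySem.Dict Char Int), w.drop j = l → i ≤ j →
    (∀ c : Char, match d.get? c with
      | none => ∀ k, i ≤ k → k < j → ¬ (w[k]? = some c)
      | some v => ∃ m : Nat, v = (m : Int) ∧ i ≤ m ∧ m < j ∧ w[m]? = some c ∧
          ∀ k, i ≤ k → k < m → ¬ (w[k]? = some c)) →
    ((PySem.List.enumerate l (j : Int)).foldl pvStepA (res, d)).1 = pvRef w l j i res := by
  intro l
  induction l with
  | nil => intro j i res d _ _ _; simp [PySem.List.enumerate_nil, pvRef]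
  | cons c t ih =>
    intro j i res d hdrop hij hinv
    have hj : w[j]? = some c := drop_cons_head hdrop
    have ht : w.drop (j + 1) = t := drop_cons_tail hdrop
    rw [PySem.List.enumerate_cons, List.foldl_cons]
    show ((PySem.List.enumerate t ((j:Int) + 1)).foldl pvStepA (pvStepA (res, d) ((j:Int), c))).1 = _
    have hj1 : ((j : Int) + 1) = ((j + 1 : Nat) : Int) := by push_cast; ring
    have hic := hinv c
    cases hd : d.get? c with
    | none =>
      rw [hd] at hic
      -- no occurrence of c in [i,j): no cut
      have hcond : pvCondB w i j = false := by
        rw [Bool.eq_false_iff]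
        intro hc
        obtain ⟨k, hik, h3, he⟩ := (pvCondB_iff w i j).mp hc
        exact hic k hik (by omega) (by rw [he, hj])
      simp only [pvStepA, hd, pvRef, hcond, Bool.false_eq_true, if_false]
      rw [hj1]
      apply ih (j + 1) i res _ ht (by omega)
      intro c'
      by_cases hcc : c' = c
      · subst hcc
        rw [PySem.Dict.get?_insert_self]
        exact ⟨j, rfl, hij, by omega, hj, fun k hk1 hk2 => hic k hk1 hk2⟩
      · rw [PySem.Dict.get?_insert_of_ne _ _ hcc]
        have := hinv c'
        cases hd' : d.get? c' with
        | none =>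
          rw [hd'] at this
          intro k hk1 hk2
          rcases Nat.lt_or_ge k j with h | h
          · exact this k hk1 h
          · have hkj : k = j := by omega
            subst hkj
            rw [hj]; intro h'
            exact hcc (by injection h' with h''; exact h''.symm)
        | some v =>
          rw [hd'] at this
          obtain ⟨m, rfl, h1, h2, h3, h4⟩ := this
          exact ⟨m, rfl, h1, by omega, h3, h4⟩
    | some v =>
      rw [hd] at hic
      obtain ⟨m, rfl, him, hmj, hwm, hmin⟩ := hic
      by_cases hge : (j : Int) ≥ (m : Int) + 3
      · -- cut
        have hcond : pvCondB w i j = true := by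
          rw [pvCondB_iff]
          exact ⟨m, him, by omega, by rw [hwm, hj]⟩
        simp only [pvStepA, hd, if_pos hge, pvRef, hcond, if_true]
        rw [hj1]
        apply ih (j + 1) (j + 1) (res + 1) _ ht (by omega)
        intro c'
        simp only [PySem.Dict.get?_empty]
        intro k hk1 hk2 _
        omega
      · -- repeat too close: no cut, dict unchanged
        have hcond : pvCondB w i j = false := by
          rw [Bool.eq_false_iff]
          intro hc
          obtain ⟨k, hik, h3, he⟩ := (pvCondB_iff w i j).mp hc
          rw [hj] at he
          rcases Nat.lt_or_ge k m with h | h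
          · exact hmin k hik h he
          · omega
        simp only [pvStepA, hd, if_neg hge, pvRef, hcond, Bool.false_eq_true, if_false]
        rw [hj1]
        apply ih (j + 1) i res d ht (by omega)
        intro c'
        have := hinv c'
        cases hd' : d.get? c' with
        | none =>
          rw [hd'] at this
          intro k hk1 hk2
          rcases Nat.lt_or_ge k j with h | h
          · exact this k hk1 h
          · have hkj : k = j := by omega
            subst hkj
            rw [hj]
            intro h'
            have hcc : c' = c := by injection h' with h''; exact h''.symm
            subst hcc
            rw [hd] at hd'; cases hd'
        | some v' =>
          rw [hd'] at this
          obtain ⟨m', rfl, h1, h2, h3, h4⟩ := this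
          exact ⟨m', rfl, h1, by omega, h3, h4⟩

-- ---- phase 1 of B: pvFar w = map pvLo over the indices ----
theorem lemFar (w : List Char) : ∀ (l : List Char) (j : Nat)
    (last : PySem.Dict Char Int) (acc : List Int), w.drop j = l →
    (∀ c : Char, last.get? c = (pvLastOcc w (j - 3) c).map Int.ofNat) →
    ((PySem.List.enumerate l (j : Int)).foldl (pvFarStep w) (last, acc)).2 =
      acc ++ (List.range' j (w.length - j)).map (pvLo w) := by
  intro l
  induction l with
  | nil =>
    intro j last acc hdrop _
    have : w.length ≤ j := by
      by_contra h
      have := List.drop_eq_nil_iff.mp hdrop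
      omega
    simp [PySem.List.enumerate_nil, Nat.sub_eq_zero_of_le this]
  | cons c t ih =>
    intro j last acc hdrop hinv
    have hj : w[j]? = some c := drop_cons_head hdrop
    have ht : w.drop (j + 1) = t := drop_cons_tail hdrop
    have hjn : j < w.length := drop_cons_lt hdrop
    rw [PySem.List.enumerate_cons, List.foldl_cons]
    -- the updated dict holds the greatest occurrence < j - 2 of each char
    set last' := if (j : Int) ≥ 3
        then last.insert ((PySem.List.pyGet? w ((j : Int) - 3)).getD ' ') ((j : Int) - 3)
        else last with hlast'
    have hinv' : ∀ c' : Char, last'.get? c' = (pvLastOcc w (j - 2) c').map Int.ofNat := by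
      intro c'
      by_cases h3 : 3 ≤ j
      · have hcast : ((j : Int) - 3) = ((j - 3 : Nat) : Int) := by omega
        obtain ⟨c0, hc0⟩ : ∃ c0, w[j - 3]? = some c0 :=
          ⟨w[j-3], List.getElem?_eq_getElem (by omega)⟩
        have hget : (PySem.List.pyGet? w ((j : Int) - 3)).getD ' ' = c0 := by
          rw [hcast, PySem.List.pyGet?_natCast, hc0]; rfl
        have hrange : List.range (j - 2) = List.range (j - 3) ++ [j - 3] := by
          have : j - 2 = (j - 3) + 1 := by omega
          rw [this, List.range_succ]
        rw [hlast', if_pos (by omega), hget]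
        by_cases hcc : c' = c0
        · subst hcc
          rw [PySem.Dict.get?_insert_self]
          unfold pvLastOcc
          rw [hrange, List.reverse_append, List.reverse_singleton, List.singleton_append,
            List.find?_cons_of_pos (by rw [hc0]; simp)]
          simp only [Option.map_some, Option.some.injEq]
          omega
        · have hne : c0 ≠ c' := fun h => hcc h.symm
          rw [PySem.Dict.get?_insert_of_ne _ _ hcc, hinv c']
          unfold pvLastOcc
          rw [hrange, List.reverse_append, List.reverse_singleton, List.singleton_append,
            List.find?_cons_of_neg (by rw [hc0]; simp [hne])]
      · have : j - 2 = 0 ∧ j - 3 = 0 := by omega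
        rw [hlast', if_neg (by omega), hinv c', this.1, this.2]
    have hfar : last'.getD c (-1) = pvLo w j := by
      rw [PySem.Dict.getD_eq_get?_getD, hinv' c]
      unfold pvLo pvLastOcc
      simp only [hj]
      cases (List.range (j - 2)).reverse.find? (fun k => w[k]? == some c) <;> simp
    show ((PySem.List.enumerate t ((j:Int)+1)).foldl (pvFarStep w) (last', acc ++ [last'.getD c (-1)])).2 = _
    have hj1 : ((j : Int) + 1) = ((j + 1 : Nat) : Int) := by push_cast; ring
    rw [hfar, hj1, ih (j + 1) last' (acc ++ [pvLo w j]) ht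
      (by intro c'; rw [show j + 1 - 3 = j - 2 from by omega]; exact hinv' c')]
    have hlen : w.length - j = (w.length - (j + 1)) + 1 := by omega
    rw [hlen, List.range'_succ, List.map_cons, List.append_assoc]
    rfl

-- ---- phase 2 of B equals the reference greedy ----
theorem lemB (w : List Char) : ∀ (l : List Char) (j i : Nat) (res : Int), w.drop j = l →
    ((PySem.List.enumerate ((List.range' j (w.length - j)).map (pvLo w)) (j : Int)).foldl
        pvCutStep (res, (i : Int))).1 = pvRef w l j i res := by
  intro l
  induction l with
  | nil =>
    intro j i res hdrop
    have : w.length ≤ j := by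
      by_contra h
      have := List.drop_eq_nil_iff.mp hdrop
      omega
    simp [Nat.sub_eq_zero_of_le this, PySem.List.enumerate_nil, pvRef]
  | cons c t ih =>
    intro j i res hdrop
    have ht : w.drop (j + 1) = t := drop_cons_tail hdrop
    have hjn : j < w.length := drop_cons_lt hdrop
    have hlen : w.length - j = (w.length - (j + 1)) + 1 := by omega
    rw [hlen, List.range'_succ, List.map_cons, PySem.List.enumerate_cons, List.foldl_cons]
    have hj1 : ((j : Int) + 1) = ((j + 1 : Nat) : Int) := by push_cast; ring
    show ((PySem.List.enumerate _ ((j:Int)+1)).foldl pvCutStep (pvCutStep (res, (i:Int)) ((j:Int), pvLo w j))).1 = _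
    by_cases hc : pvCondB w i j = true
    · have hge : pvLo w j ≥ (i : Int) := (pvLo_ge_iff w i j).mpr hc
      simp only [pvCutStep, if_pos hge, pvRef, hc, if_true]
      rw [hj1]
      exact ih (j + 1) (j + 1) (res + 1) ht
    · have hge : ¬ (pvLo w j ≥ (i : Int)) := fun h => hc ((pvLo_ge_iff w i j).mp h)
      simp only [pvCutStep, if_neg hge, pvRef, hc, Bool.false_eq_true, if_false]
      rw [hj1]
      exact ih (j + 1) i res ht

-- ===== VERDICT (by name: the statement is the Claim_ definition above) =====
theorem maxSubstrings_spec : Claim_equal_maxSubstrings := by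
  intro word _
  show maxSubstrings word = maxSubstrings_alt word
  unfold maxSubstrings maxSubstrings_alt pvFar
  have hA := lemA word.toList word.toList 0 0 0 PySem.Dict.empty rfl (le_refl 0)
    (by intro c; simp only [PySem.Dict.get?_empty]; intro k h1 h2; omega)
  have hFar := lemFar word.toList word.toList 0 PySem.Dict.empty [] rfl
    (by intro c; simp [pvLastOcc])
  have hB := lemB word.toList word.toList 0 0 0 rfl
  simp only [Nat.cast_zero] at hA hFar hB
  rw [hA, hFar]
  simp only [Nat.sub_zero, List.nil_append] at hB ⊢
  rw [← hB]
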